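-- pv_equiv track=rewrite | github.com/artfin/firefly-examples | run_examples.py | locate_group
-- ===== SOURCE A (Python) =====
-- def locate_group(lines, group):
--     group_start = None
--     for n, line in enumerate(lines):
--         if group in line:
--             group_start = n
--             break
--
--     if group_start is None:
--         return None, None
--
--     group_end = None
--     for n in range(group_start, len(lines)):
--         line = lines[n]
--         if '$END' in line:
--             group_end = n
--             break
--
--     return group_start, group_end
-- ===== SOURCE B (Python) =====
-- def locate_group(lines, group):
--     group_start = None
--     for n, line in enumerate(lines):
--         if group_start is None:
--             if group in line:
--                 if '$END' in line:
--                     return n, n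
--                 group_start = n
--         elif '$END' in line:
--             return group_start, n
--     return group_start, None
-- ===== Notes on version B (the rewrite author's own statement) =====
-- stated objective: simpler
-- what changed: Replaced A's two sequential scans (find the group line, then rescan lines from that index via range/indexing for '$END') by one pass over enumerate(lines) with a state variable, returning as soon as both positions are known.
import Mathlib
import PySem

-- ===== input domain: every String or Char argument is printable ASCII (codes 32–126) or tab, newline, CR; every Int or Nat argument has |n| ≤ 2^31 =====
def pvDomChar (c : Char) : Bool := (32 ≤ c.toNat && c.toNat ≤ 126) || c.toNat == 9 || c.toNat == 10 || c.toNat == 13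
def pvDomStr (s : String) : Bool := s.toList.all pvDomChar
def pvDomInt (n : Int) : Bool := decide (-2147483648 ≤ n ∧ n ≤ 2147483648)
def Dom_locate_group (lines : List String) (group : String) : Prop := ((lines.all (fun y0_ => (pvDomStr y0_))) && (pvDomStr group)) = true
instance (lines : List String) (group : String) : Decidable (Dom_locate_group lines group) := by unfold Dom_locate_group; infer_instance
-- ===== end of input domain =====

-- B replaces A's two sequential scans (find group line, then rescan from that index
-- via indexing) by one pass with a state variable: simpler, single traversal.


-- ===== PORT A =====
-- first loop: 'for n, line in enumerate(lines): if group in line: group_start = n; break'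
def pvFindStartA (group : String) : List String → Int → Option Int
  | [], _ => none
  | l :: ls, n => if PySem.Str.isIn group l then some n else pvFindStartA group ls (n + 1)

-- second loop: 'for n in range(group_start, len(lines)): line = lines[n]; if "$END" in line: …'
def pvFindEndA (lines : List String) : List Int → Option Int
  | [] => none
  | n :: ns =>
    match PySem.List.pyGet? lines n with
    | some line => if PySem.Str.isIn "$END" line then some n else pvFindEndA lines ns
    | none => none  -- unreachable: n always in range

def locate_group (lines : List String) (group : String) : Option Int × Option Int :=
  match pvFindStartA group lines 0 with
  | none => (none, none)
  | some s => (some s, pvFindEndA lines (PySem.List.pyRange s (lines.length : Int) 1))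

-- ===== PORT B =====
-- single pass with state variable group_start
def pvGoB (group : String) : List String → Int → Option Int → Option Int × Option Int
  | [], _, gs => (gs, none)
  | l :: ls, n, none =>
    if PySem.Str.isIn group l then
      if PySem.Str.isIn "$END" l then (some n, some n)
      else pvGoB group ls (n + 1) (some n)
    else pvGoB group ls (n + 1) none
  | l :: ls, n, some s =>
    if PySem.Str.isIn "$END" l then (some s, some n) else pvGoB group ls (n + 1) (some s)

def locate_group_alt (lines : List String) (group : String) : Option Int × Option Int :=
  pvGoB group lines 0 none

-- ===== PRECONDITION & SPEC =====
def Spec_locate_group (lines : List String) (group : String) (out : Option Int × Option Int) : Prop := out = locate_group_alt lines group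
instance (lines : List String) (group : String) (out : Option Int × Option Int) : Decidable (Spec_locate_group lines group out) := by unfold Spec_locate_group; infer_instance

-- ===== CLAIM (what is proved, stated in full; the proofs are below) =====
def Claim_equal_locate_group : Prop := ∀ (lines : List String) (group : String), Dom_locate_group lines group → Spec_locate_group lines group (locate_group lines group)

-- ===== LEMMAS AND PROOFS =====

-- structural scan for '$END' over a suffix, indices counted from k
def pvScanE : List String → Nat → Option Int
  | [], _ => none
  | l :: ls, k => if PySem.Str.isIn "$END" l then some (k : Int) else pvScanE ls (k + 1)

-- the final 'if group_start is None' dispatch of A, as a function of the first loop's result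
def pvAssemble (lines : List String) : Option Int → Option Int × Option Int
  | none => (none, none)
  | some s => (some s, pvFindEndA lines (PySem.List.pyRange s (lines.length : Int) 1))

theorem locate_group_eq_assemble (lines : List String) (group : String) :
    locate_group lines group = pvAssemble lines (pvFindStartA group lines 0) := by
  cases h : pvFindStartA group lines 0 <;> simp [locate_group, pvAssemble, h]

theorem pvFindEndA_eq_scanE (suf : List String) : ∀ (lines : List String) (k : Nat),
    lines.drop k = suf →
    pvFindEndA lines (PySem.List.pyRange (k : Int) (lines.length : Int) 1) = pvScanE suf k := by
  induction suf with
  | nil =>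
    intro lines k h
    have hk : lines.length ≤ k := List.drop_eq_nil_iff.mp h
    rw [PySem.List.pyRange_one_eq_nil (by exact_mod_cast hk)]
    rfl
  | cons l ls ih =>
    intro lines k h
    have hk : k < lines.length := by
      rcases Nat.lt_or_ge k lines.length with h' | h'
      · exact h'
      · rw [List.drop_eq_nil_iff.mpr h'] at h; cases h
    have hget : lines[k]? = some l := by
      have hh : (lines.drop k).head? = some l := by rw [h]; rfl
      rwa [List.head?_drop] at hh
    have hdrop : lines.drop (k + 1) = ls := by
      have hd : lines.drop (k + 1) = (lines.drop k).drop 1 := by rw [← List.drop_drop]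
      rw [hd, h]; rfl
    have hc : ((k : Int) + 1) = ((k + 1 : Nat) : Int) := by push_cast; ring
    rw [PySem.List.pyRange_one_cons (by exact_mod_cast hk)]
    have e1 : pvFindEndA lines ((k : Int) :: PySem.List.pyRange ((k : Int) + 1) (lines.length : Int) 1)
        = match PySem.List.pyGet? lines (k : Int) with
          | some line => if PySem.Str.isIn "$END" line then some (k : Int)
              else pvFindEndA lines (PySem.List.pyRange ((k : Int) + 1) (lines.length : Int) 1)
          | none => none := rfl
    rw [e1, PySem.List.pyGet?_natCast, hget]
    have ered : (match some l with
        | some line => if PySem.Str.isIn "$END" line = true then some (k : Int)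
            else pvFindEndA lines (PySem.List.pyRange ((k : Int) + 1) (lines.length : Int) 1)
        | none => (none : Option Int))
        = if PySem.Str.isIn "$END" l = true then some (k : Int)
            else pvFindEndA lines (PySem.List.pyRange ((k : Int) + 1) (lines.length : Int) 1) := rfl
    rw [ered]
    have e2 : pvScanE (l :: ls) k
        = if PySem.Str.isIn "$END" l then some ((k : Nat) : Int) else pvScanE ls (k + 1) := rfl
    rw [e2]
    by_cases hend : PySem.Str.isIn "$END" l = true
    · rw [if_pos hend, if_pos hend]
    · rw [if_neg hend, if_neg hend, hc]
      exact ih lines (k + 1) hdrop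

theorem pvGoB_some (group : String) (suf : List String) : ∀ (k : Nat) (s : Int),
    pvGoB group suf (k : Int) (some s) = (some s, pvScanE suf k) := by
  induction suf with
  | nil => intro k s; rfl
  | cons l ls ih =>
    intro k s
    have e1 : pvGoB group (l :: ls) (k : Int) (some s)
        = if PySem.Str.isIn "$END" l then (some s, some (k : Int))
          else pvGoB group ls ((k : Int) + 1) (some s) := rfl
    have e2 : pvScanE (l :: ls) k
        = if PySem.Str.isIn "$END" l then some ((k : Nat) : Int) else pvScanE ls (k + 1) := rfl
    have hc : ((k : Int) + 1) = ((k + 1 : Nat) : Int) := by push_cast; ring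
    rw [e1, e2]
    by_cases hend : PySem.Str.isIn "$END" l = true
    · rw [if_pos hend, if_pos hend]
    · rw [if_neg hend, if_neg hend, hc, ih (k + 1) s]

theorem pvMain (group : String) (suf : List String) : ∀ (lines : List String) (k : Nat),
    lines.drop k = suf →
    pvGoB group suf (k : Int) none = pvAssemble lines (pvFindStartA group suf (k : Int)) := by
  induction suf with
  | nil => intro lines k _; rfl
  | cons l ls ih =>
    intro lines k h
    have hdrop : lines.drop (k + 1) = ls := by
      have hd : lines.drop (k + 1) = (lines.drop k).drop 1 := by rw [← List.drop_drop]
      rw [hd, h]; rfl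
    have hc : ((k : Int) + 1) = ((k + 1 : Nat) : Int) := by push_cast; ring
    have e1 : pvGoB group (l :: ls) (k : Int) none
        = if PySem.Str.isIn group l then
            (if PySem.Str.isIn "$END" l then (some (k : Int), some (k : Int))
             else pvGoB group ls ((k : Int) + 1) (some (k : Int)))
          else pvGoB group ls ((k : Int) + 1) none := rfl
    have e2 : pvFindStartA group (l :: ls) (k : Int)
        = if PySem.Str.isIn group l then some (k : Int)
          else pvFindStartA group ls ((k : Int) + 1) := rfl
    rw [e1, e2]
    by_cases hg : PySem.Str.isIn group l = true
    · rw [if_pos hg, if_pos hg]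
      have e3 : pvAssemble lines (some (k : Int))
          = (some (k : Int), pvFindEndA lines (PySem.List.pyRange (k : Int) (lines.length : Int) 1)) := rfl
      rw [e3, pvFindEndA_eq_scanE (l :: ls) lines k h]
      have e4 : pvScanE (l :: ls) k
          = if PySem.Str.isIn "$END" l then some ((k : Nat) : Int) else pvScanE ls (k + 1) := rfl
      rw [e4]
      by_cases hend : PySem.Str.isIn "$END" l = true
      · rw [if_pos hend, if_pos hend]
      · rw [if_neg hend, if_neg hend, hc, pvGoB_some group ls (k + 1) ((k : Nat) : Int)]
    · rw [if_neg hg, if_neg hg, hc]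
      exact ih lines (k + 1) hdrop

-- ===== VERDICT (by name: the statement is the Claim_ definition above) =====
theorem locate_group_spec : Claim_equal_locate_group := by
  intro lines group _
  unfold Spec_locate_group locate_group_alt
  rw [locate_group_eq_assemble]
  have h := pvMain group lines lines 0 (by simp)
  simp only [Nat.cast_zero] at h
  rw [h]
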